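-- pv_equiv track=rewrite | github.com/CUHKSZ-Yu/EMC | tree_generation/tree_set.py | print_trees
-- ===== SOURCE A (Python) =====
-- def print_trees(shape, leaf_sets, leaf_posi):
--     assembled_total = []
--     for tree in leaf_sets:
--         leaf_num = 0
--         assembled_tree = ""
--         for i in range(len(shape)):
--             if i in leaf_posi:
--                 assembled_tree += str(tree[leaf_num])
--                 leaf_num+=1
--             else: assembled_tree += shape[i]
--         assembled_total.append(assembled_tree)
--
--     return assembled_total
-- ===== SOURCE B (Python) =====
-- def print_trees(shape, leaf_sets, leaf_posi):
--     # Template-fill: precompute leaf positions once, then per tree overwrite a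
--     # mutable copy of the shape instead of re-testing membership per character.
--     leaf_positions = [i for i in range(len(shape)) if i in leaf_posi]
--     assembled_total = []
--     for tree in leaf_sets:
--         parts = list(shape)
--         for idx, pos in enumerate(leaf_positions):
--             parts[pos] = str(tree[idx])
--         assembled_total.append("".join(parts))
--     return assembled_total
-- ===== Notes on version B (the rewrite author's own statement) =====
-- stated objective: faster
-- what changed: B precomputes the list of leaf positions once and, per tree, fills a mutable copy of the shape by overwriting each leaf position (enumerate-driven template fill), instead of A's per-character membership scan of leaf_posi inside the per-tree loop.
import Mathlib
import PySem

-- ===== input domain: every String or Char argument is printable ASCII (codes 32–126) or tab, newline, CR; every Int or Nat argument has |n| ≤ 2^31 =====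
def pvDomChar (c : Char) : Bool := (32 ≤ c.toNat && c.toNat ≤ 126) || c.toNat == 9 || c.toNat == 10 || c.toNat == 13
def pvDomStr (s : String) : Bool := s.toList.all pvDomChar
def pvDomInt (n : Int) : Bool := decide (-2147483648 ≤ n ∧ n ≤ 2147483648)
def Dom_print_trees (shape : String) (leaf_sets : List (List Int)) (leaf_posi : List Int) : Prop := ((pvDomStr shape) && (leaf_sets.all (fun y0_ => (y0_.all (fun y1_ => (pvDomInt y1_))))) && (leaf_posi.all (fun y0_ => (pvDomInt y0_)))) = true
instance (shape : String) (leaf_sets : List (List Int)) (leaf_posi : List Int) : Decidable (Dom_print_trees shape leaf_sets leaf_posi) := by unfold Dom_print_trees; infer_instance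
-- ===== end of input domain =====

-- B replaces A's per-character membership scan by a precomputed leaf-position list and a per-tree template fill (overwrite a copy of the shape); return-value equivalence only.

-- ===== PORT A =====
-- per-tree assembly: scan positions 0..len(shape)-1, branch on membership, carry (leaf_num, assembled chars)
-- (tree[leaf_num] is PySem.List.pyGetD with default 0: Pre_ keeps the index in range, exactly where Python does not raise)
def pvAssembleA (shapeL : List Char) (L : List Int) (tree : List Int) : Int × List Char :=
  (PySem.List.pyRange 0 (shapeL.length : Int) 1).foldl
    (fun st i =>
      if i ∈ L then (st.1 + 1, st.2 ++ PySem.Int.toChars (PySem.List.pyGetD tree st.1 0))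
      else (st.1, st.2 ++ [PySem.List.pyGetD shapeL i ' ']))
    (0, [])

def print_trees (shape : String) (leaf_sets : List (List Int)) (leaf_posi : List Int) : List String :=
  leaf_sets.foldl (fun acc tree => acc ++ [String.ofList (pvAssembleA shape.toList leaf_posi tree).2]) []

-- ===== PORT B =====
-- leaf_positions = [i for i in range(len(shape)) if i in leaf_posi]
def pvLeafPositions (n : Nat) (L : List Int) : List Nat :=
  (List.range n).filter (fun i => decide ((i : Int) ∈ L))

-- parts = list(shape); for idx, pos in enumerate(leaf_positions): parts[pos] = str(tree[idx]); ''.join(parts)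
def pvFillB (parts0 : List (List Char)) (lp : List Nat) (tree : List Int) : List (List Char) :=
  (PySem.List.enumerate lp).foldl
    (fun parts p => parts.set p.2 (PySem.Int.toChars (PySem.List.pyGetD tree p.1 0))) parts0

def print_trees_alt (shape : String) (leaf_sets : List (List Int)) (leaf_posi : List Int) : List String :=
  let lp := pvLeafPositions shape.toList.length leaf_posi
  leaf_sets.map (fun tree =>
    String.ofList (PySem.Chars.join [] (pvFillB (shape.toList.map (fun c => [c])) lp tree)))

-- ===== PRECONDITION & SPEC =====
-- Pre_ excludes exactly the inputs where Python A raises IndexError: some tree has fewer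
-- entries than there are leaf positions inside range(len(shape)) (B raises there too).
def Pre_print_trees (shape : String) (leaf_sets : List (List Int)) (leaf_posi : List Int) : Prop :=
  ∀ tree ∈ leaf_sets,
    ((List.range shape.toList.length).filter (fun i => decide ((i : Int) ∈ leaf_posi))).length ≤ tree.length
instance (shape : String) (leaf_sets : List (List Int)) (leaf_posi : List Int) : Decidable (Pre_print_trees shape leaf_sets leaf_posi) := by unfold Pre_print_trees; infer_instance

def pvWitness_print_trees : String × List (List Int) × List Int := ("a(b)", [[3, 4], [5, 6]], [0, 2])

def Spec_print_trees (shape : String) (leaf_sets : List (List Int)) (leaf_posi : List Int) (out : List String) : Prop := out = print_trees_alt shape leaf_sets leaf_posi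
instance (shape : String) (leaf_sets : List (List Int)) (leaf_posi : List Int) (out : List String) : Decidable (Spec_print_trees shape leaf_sets leaf_posi out) := by unfold Spec_print_trees; infer_instance

-- ===== CLAIM (what is proved, stated in full; the proofs are below) =====
def Claim_equal_print_trees : Prop := ∀ (shape : String) (leaf_sets : List (List Int)) (leaf_posi : List Int), Dom_print_trees shape leaf_sets leaf_posi → Pre_print_trees shape leaf_sets leaf_posi → Spec_print_trees shape leaf_sets leaf_posi (print_trees shape leaf_sets leaf_posi)

-- ===== LEMMAS AND PROOFS =====

-- rank of a position = number of leaf positions strictly below it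
def pvRank (L : List Int) (i : Nat) : Nat := (pvLeafPositions i L).length

-- the character chunk both programs emit at position i
def pvF (shapeL : List Char) (L : List Int) (tree : List Int) (i : Nat) : List Char :=
  if (i : Int) ∈ L then PySem.Int.toChars (PySem.List.pyGetD tree ((pvRank L i : Nat) : Int) 0)
  else [shapeL.getD i ' ']

lemma pvA_fold (shapeL : List Char) (L : List Int) (tree : List Int) (m : Nat) :
    (PySem.List.pyRange 0 (m : Int) 1).foldl
      (fun st i =>
        if i ∈ L then (st.1 + 1, st.2 ++ PySem.Int.toChars (PySem.List.pyGetD tree st.1 0))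
        else (st.1, st.2 ++ [PySem.List.pyGetD shapeL i ' ']))
      ((0 : Int), ([] : List Char))
    = ((pvRank L m : Int), ((List.range m).map (pvF shapeL L tree)).flatten) := by
  induction m with
  | zero => simp [pvRank, PySem.List.pyRange_one_eq_nil]
  | succ m ih =>
    have hcast : ((m + 1 : Nat) : Int) = (m : Int) + 1 := by push_cast; ring
    rw [hcast, PySem.List.pyRange_one_succ_right (by positivity), List.foldl_append, ih]
    by_cases h : (m : Int) ∈ L
    · simp [h, pvRank, pvLeafPositions, pvF, List.range_succ, List.filter_append]
    · simp [h, pvRank, pvLeafPositions, pvF, List.range_succ, List.filter_append]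

lemma pvAssembleA_eq (shapeL : List Char) (L : List Int) (tree : List Int) :
    pvAssembleA shapeL L tree
      = ((pvRank L shapeL.length : Int), ((List.range shapeL.length).map (pvF shapeL L tree)).flatten) := by
  exact pvA_fold shapeL L tree shapeL.length

lemma pvFill_spec (shapeL : List Char) (L : List Int) (tree : List Int) (n : Nat) (hn : n ≤ shapeL.length) :
    pvFillB (shapeL.map (fun c => [c])) (pvLeafPositions n L) tree
      = (List.range shapeL.length).map
          (fun i => if i < n then pvF shapeL L tree i else [shapeL.getD i ' ']) := by
  induction n with
  | zero =>
    simp only [pvLeafPositions, List.range_zero, List.filter_nil, pvFillB,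
      PySem.List.enumerate_nil, List.foldl_nil, Nat.not_lt_zero, if_false]
    apply List.ext_getElem
    · simp
    · intro i h1 h2
      simp [List.getD, List.getElem?_eq_getElem (by simpa using h1)]
  | succ n ih =>
    have hn' : n ≤ shapeL.length := by omega
    have hlp : pvLeafPositions (n + 1) L
        = pvLeafPositions n L ++ (List.filter (fun i : Nat => decide ((i : Int) ∈ L)) [n]) := by
      simp [pvLeafPositions, List.range_succ, List.filter_append]
    by_cases h : (n : Int) ∈ L
    · have hlp2 : pvLeafPositions (n + 1) L = pvLeafPositions n L ++ [n] := by
        simp [hlp, h]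
      rw [hlp2]
      unfold pvFillB
      rw [PySem.List.enumerate_append, List.foldl_append]
      have := ih hn'
      unfold pvFillB at this
      rw [this]
      simp only [PySem.List.enumerate_cons, PySem.List.enumerate_nil, List.foldl_cons, List.foldl_nil]
      have hrank : (pvLeafPositions n L).length = pvRank L n := rfl
      apply List.ext_getElem
      · simp
      · intro i h1 h2
        simp only [List.length_set, List.length_map, List.length_range] at h1 h2
        rw [List.getElem_set]
        simp only [List.getElem_map, List.getElem_range]
        by_cases hi : n = i
        · subst hi
          simp only [if_pos (Nat.lt_succ_self n)]
          simp [pvF, h, hrank]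
        · rw [if_neg hi]
          by_cases hlt : i < n
          · rw [if_pos hlt, if_pos (by omega)]
          · rw [if_neg hlt, if_neg (by omega)]
    · have hlp2 : pvLeafPositions (n + 1) L = pvLeafPositions n L := by
        simp [hlp, h]
      rw [hlp2, ih hn']
      apply List.map_congr_left
      intro i hi
      by_cases hlt : i < n
      · rw [if_pos hlt, if_pos (by omega)]
      · rw [if_neg hlt]
        by_cases heq : i = n
        · subst heq
          rw [if_pos (by omega)]
          simp [pvF, h]
        · rw [if_neg (by omega)]

lemma pvJoin_nil (parts : List (List Char)) : PySem.Chars.join [] parts = parts.flatten := by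
  show List.intercalate [] parts = parts.flatten
  induction parts with
  | nil => simp [List.intercalate]
  | cons p ps ih => cases ps <;> simp_all [List.intercalate, List.intersperse]

lemma pvTree_eq (shapeL : List Char) (L : List Int) (tree : List Int) :
    (pvAssembleA shapeL L tree).2
      = PySem.Chars.join [] (pvFillB (shapeL.map (fun c => [c])) (pvLeafPositions shapeL.length L) tree) := by
  rw [pvAssembleA_eq, pvJoin_nil, pvFill_spec shapeL L tree shapeL.length le_rfl]
  show (List.map _ _).flatten = _
  congr 1
  apply List.map_congr_left
  intro i hi
  simp [List.mem_range.mp hi]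

-- ===== VERDICT (by name: the statement is the Claim_ definition above) =====
theorem print_trees_spec : Claim_equal_print_trees := by
  intro shape leaf_sets leaf_posi _ _
  show _ = _
  unfold print_trees print_trees_alt
  rw [PySem.List.foldl_append_singleton_eq_map]
  simp only [List.nil_append]
  apply List.map_congr_left
  intro tree _
  rw [pvTree_eq]
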